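-- pv_equiv track=rewrite | github.com/hisr2024/MindVibe | backend/services/kiaan_conversation_flow.py | _get_dominant
-- ===== SOURCE A (Python) =====
-- def _get_dominant(history: list[str]) -> str | None:
--     """Get the most frequent item in a history list."""
--     if not history:
--         return None
--
--     counts: dict[str, int] = {}
--     for item in history:
--         if item and item != "neutral" and item != "general":
--             counts[item] = counts.get(item, 0) + 1
--
--     if not counts:
--         return history[-1] if history else None
--
--     return max(counts, key=counts.get)
-- ===== SOURCE B (Python) =====
-- def _get_dominant(history: list[str]) -> str | None:
--     """Get the most frequent item in a history list."""
--     if not history: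
--         return None
--     items = [i for i in history if i and i != "neutral" and i != "general"]
--     # elimination loop: count the first item, drop all its occurrences, repeat;
--     # an earlier item is kept unless a later one is strictly more frequent
--     best = None
--     while items:
--         head = items[0]
--         c = items.count(head)
--         if best is None or best[1] < c:
--             best = (head, c)
--         items = [y for y in items if y != head]
--     if best is None:
--         return history[-1]
--     return best[0]
-- ===== Notes on version B (the rewrite author's own statement) =====
-- stated objective: alternative
-- what changed: Replaces the one-pass count dictionary plus max over its keys with an elimination loop: count the first qualifying item, delete all its occurrences, repeat on the remainder, keeping an earlier item unless a later one is strictly more frequent.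
import Mathlib
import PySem

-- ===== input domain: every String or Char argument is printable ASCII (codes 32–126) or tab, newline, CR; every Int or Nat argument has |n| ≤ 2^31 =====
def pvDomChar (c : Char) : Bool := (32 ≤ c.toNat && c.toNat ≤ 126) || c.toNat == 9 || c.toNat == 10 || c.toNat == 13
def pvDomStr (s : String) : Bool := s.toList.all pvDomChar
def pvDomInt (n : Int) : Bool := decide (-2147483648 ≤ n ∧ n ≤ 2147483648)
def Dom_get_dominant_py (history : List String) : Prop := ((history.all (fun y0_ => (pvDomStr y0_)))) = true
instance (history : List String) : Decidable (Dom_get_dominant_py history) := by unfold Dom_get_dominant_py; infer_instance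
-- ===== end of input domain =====

-- B replaces the one-pass count dictionary with an elimination loop: count the first
-- qualifying item, delete all its occurrences, repeat on the rest, earlier item wins
-- ties — an alternative algorithm of different shape, not claimed faster.

-- ===== PORT A =====
def get_dominant_py (history : List String) : Option String :=
  if history = [] then none
  else
    let counts : PySem.Dict String Int :=
      history.foldl (fun d item =>
        if item ≠ "" && item ≠ "neutral" && item ≠ "general" then
          d.insert item (d.getD item 0 + 1)
        else d) PySem.Dict.empty
    if counts.keys = [] then PySem.List.pyGet? history (-1)
    else PySem.List.max? counts.keys (fun k => counts.getD k 0)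

-- ===== PORT B =====
-- elimination loop: count the first item, drop all its occurrences, repeat;
-- an earlier item is kept unless a later one is strictly more frequent
def pickLoop : List String → Option (String × Int) → Option (String × Int)
  | [], best => best
  | head :: t, best =>
    let c : Int := ((head :: t).count head : Int)
    let best' : Option (String × Int) :=
      match best with
      | none => some (head, c)
      | some b => if b.2 < c then some (head, c) else some b
    pickLoop ((head :: t).filter (fun y => y ≠ head)) best'
termination_by l _ => l.length
decreasing_by
  simp only [List.filter_cons, ne_eq, not_true_eq_false, decide_false, List.length_cons]
  exact Nat.lt_succ_of_le (List.length_filter_le _ _)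

def get_dominant_py_alt (history : List String) : Option String :=
  if history = [] then none
  else
    let items : List String :=
      history.filter (fun i => i ≠ "" && i ≠ "neutral" && i ≠ "general")
    match pickLoop items none with
    | none => PySem.List.pyGet? history (-1)
    | some best => some best.1

-- ===== PRECONDITION & SPEC =====
def Spec_get_dominant_py (history : List String) (out : Option String) : Prop := out = get_dominant_py_alt history
instance (history : List String) (out : Option String) : Decidable (Spec_get_dominant_py history out) := by unfold Spec_get_dominant_py; infer_instance

-- ===== CLAIM (what is proved, stated in full; the proofs are below) =====
def Claim_equal_get_dominant_py : Prop := ∀ (history : List String), Dom_get_dominant_py history → Spec_get_dominant_py history (get_dominant_py history)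

-- ===== LEMMAS AND PROOFS =====

-- Set.add folding ignores occurrences of an element the accumulator already holds
theorem foldl_add_filter (x : String) (t : List String) : ∀ (s : PySem.Set String),
    x ∈ s →
    List.foldl PySem.Set.add s t = List.foldl PySem.Set.add s (t.filter (fun y => y ≠ x)) := by
  induction t with
  | nil => intro s _; rfl
  | cons y t ih =>
    intro s hs
    by_cases hyx : y = x
    · subst hyx
      rw [List.filter_cons_of_neg (by simp)]
      simp only [List.foldl_cons]
      rw [show PySem.Set.add s y = s from by simp [PySem.Set.add, hs]]
      exact ih s hs
    · rw [List.filter_cons_of_pos (by simpa using hyx)]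
      simp only [List.foldl_cons]
      exact ih _ ((PySem.Set.mem_add _ _ _).mpr (Or.inl hs))

-- a head the tail avoids stays in front of the Set.add fold
theorem foldl_add_cons (x : String) (t : List String) : ∀ (_hx : ∀ y ∈ t, y ≠ x)
    (s : PySem.Set String),
    List.foldl PySem.Set.add (x :: s) t = x :: List.foldl PySem.Set.add s t := by
  induction t with
  | nil => intro _ s; rfl
  | cons y t ih =>
    intro hx s
    have hyx : y ≠ x := hx y (by simp)
    simp only [List.foldl_cons]
    rw [show PySem.Set.add (x :: s) y = x :: PySem.Set.add s y from by
      by_cases hy : y ∈ s <;>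
        simp [PySem.Set.add, PySem.Set.contains, hy, hyx]]
    exact ih (fun z hz => hx z (List.mem_cons_of_mem _ hz)) _

-- PySem's dedup peels its head: first element, then dedup with that element removed
theorem dedup_cons (x : String) (t : List String) :
    PySem.List.dedup (x :: t) = x :: PySem.List.dedup (t.filter (fun y => y ≠ x)) := by
  unfold PySem.List.dedup PySem.Set.ofList
  simp only [List.foldl_cons]
  rw [show PySem.Set.add PySem.Set.empty x = [x] from rfl]
  rw [foldl_add_filter x t [x] (by simp)]
  rw [show ([x] : PySem.Set String) = x :: PySem.Set.empty from rfl]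
  exact foldl_add_cons x _ (fun y hy => by simpa using List.of_mem_filter hy) _

-- the running-max fold with a seeded accumulator, via the unseeded fold
theorem foldl_max_some (f : String → Int)
    (step : Option String → String → Option String)
    (h1 : ∀ x, step none x = some x)
    (h2 : ∀ m x, step (some m) x = if f m < f x then some x else some m)
    (ks : List String) : ∀ (a : String),
    List.foldl step (some a) ks
      = match List.foldl step none ks with
        | none => some a
        | some m => if f a < f m then some m else some a := by
  induction ks with
  | nil => intro a; rfl
  | cons y ks ih =>
    intro a
    simp only [List.foldl_cons, h1, h2]
    by_cases hay : f a < f y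
    · rw [if_pos hay, ih y]
      cases h : List.foldl step none ks with
      | none => simp [hay]
      | some m =>
        by_cases hym : f y < f m
        · simp [hym, lt_trans hay hym]
        · simp [hym, hay]
    · rw [if_neg hay, ih a, ih y]
      cases h : List.foldl step none ks with
      | none => simp [hay]
      | some m =>
        by_cases hym : f y < f m
        · simp [hym]
        · have ham : ¬ f a < f m := by omega
          simp [hym, hay, ham]

-- max? peels its head: compare the head against max? of the tail, head wins ties
theorem max?_cons_eq (f : String → Int) (x : String) (ks : List String) :
    PySem.List.max? (x :: ks) f
      = match PySem.List.max? ks f with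
        | none => some x
        | some m => if f x < f m then some m else some x := by
  unfold PySem.List.max?
  simp only [List.foldl_cons]
  exact foldl_max_some f _ (fun _ => rfl)
    (fun m x => by by_cases h : f m < f x <;> simp [h]) ks x

-- max? depends only on the key values on the list
theorem max?_congr (xs : List String) (f g : String → Int)
    (h : ∀ x ∈ xs, f x = g x) :
    PySem.List.max? xs f = PySem.List.max? xs g := by
  induction xs with
  | nil => rfl
  | cons x t ih =>
    rw [max?_cons_eq f, max?_cons_eq g, ih (fun y hy => h y (List.mem_cons_of_mem _ hy))]
    cases hm : PySem.List.max? t g with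
    | none => rfl
    | some m =>
      have hmm := h m (List.mem_cons_of_mem _ (PySem.List.max?_mem hm))
      simp only [h x (by simp), hmm]

-- spec of the elimination loop: first maximal element of the dedup'd list, with its count
def mspec (l : List String) : Option (String × Int) :=
  match PySem.List.max? (PySem.List.dedup l) (fun k => (l.count k : Int)) with
  | none => none
  | some m => some (m, (l.count m : Int))

def combineBest (b r : Option (String × Int)) : Option (String × Int) :=
  match b, r with
  | none, r => r
  | some b, none => some b
  | some b, some m => if b.2 < m.2 then some m else some b

theorem combineBest_assoc (a b r : Option (String × Int)) :
    combineBest (combineBest a b) r = combineBest a (combineBest b r) := by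
  rcases a with _ | a
  · rfl
  · rcases b with _ | b
    · rfl
    · rcases r with _ | r
      · by_cases h1 : a.2 < b.2 <;> simp [combineBest, h1]
      · by_cases h1 : a.2 < b.2
        · by_cases h2 : b.2 < r.2
          · simp [combineBest, h1, h2, lt_trans h1 h2]
          · simp [combineBest, h1, h2]
        · by_cases h2 : b.2 < r.2
          · simp [combineBest, h1, h2]
          · simp [combineBest, h1, h2, show ¬ a.2 < r.2 by omega]

theorem mspec_cons (x : String) (t : List String) :
    mspec (x :: t)
      = combineBest (some (x, ((x :: t).count x : Int)))
          (mspec (t.filter (fun y => y ≠ x))) := by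
  unfold mspec
  have hcount : ∀ k ∈ PySem.List.dedup (t.filter (fun y => y ≠ x)),
      ((t.filter (fun y => y ≠ x)).count k : Int) = ((x :: t).count k : Int) := by
    intro k hk
    have hkx : k ≠ x := by
      simpa using List.of_mem_filter ((PySem.List.mem_dedup _ _).mp hk)
    rw [List.count_filter (by simpa using hkx),
      List.count_cons_of_ne (Ne.symm hkx)]
  rw [max?_congr _ _ _ hcount, dedup_cons, max?_cons_eq]
  cases h : PySem.List.max? (PySem.List.dedup (t.filter (fun y => y ≠ x)))
      (fun k => ((x :: t).count k : Int)) with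
  | none => rfl
  | some m =>
    have hm := hcount m (PySem.List.max?_mem h)
    simp only [hm, combineBest]
    by_cases hc : ((x :: t).count x : Int) < ((x :: t).count m : Int)
    · rw [if_pos hc, if_pos hc]
    · rw [if_neg hc, if_neg hc]

theorem pickLoop_spec (n : Nat) : ∀ (l : List String), l.length ≤ n →
    ∀ (best : Option (String × Int)), pickLoop l best = combineBest best (mspec l) := by
  induction n with
  | zero =>
    intro l hl best
    have h0 : l = [] := List.length_eq_zero_iff.mp (Nat.le_zero.mp hl)
    subst h0
    rw [pickLoop.eq_def]; cases best <;> rfl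
  | succ n ih =>
    intro l hl best
    cases l with
    | nil => rw [pickLoop]; cases best <;> rfl
    | cons x t =>
      rw [pickLoop.eq_def]
      dsimp only
      rw [show (match best with
          | none => some (x, ((x :: t).count x : Int))
          | some b => if b.2 < ((x :: t).count x : Int)
              then some (x, ((x :: t).count x : Int)) else some b)
        = combineBest best (some (x, ((x :: t).count x : Int))) from by
          cases best <;> rfl]
      rw [show (x :: t).filter (fun y => y ≠ x) = t.filter (fun y => y ≠ x) from
        List.filter_cons_of_neg (by simp)]
      have hlen : (t.filter (fun y => y ≠ x)).length ≤ n :=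
        le_trans (List.length_filter_le _ _) (Nat.succ_le_succ_iff.mp hl)
      rw [ih _ hlen, mspec_cons, ← combineBest_assoc]

theorem get_dominant_core (history : List String) :
    get_dominant_py history = get_dominant_py_alt history := by
  unfold get_dominant_py get_dominant_py_alt
  by_cases hnil : history = []
  · simp [hnil]
  · simp only [hnil, ite_false]
    rw [← List.foldl_filter, PySem.Dict.foldl_insert_getD_add_one_eq_counter,
      PySem.Dict.keys_counter]
    set qual := history.filter (fun i => i ≠ "" && i ≠ "neutral" && i ≠ "general") with hq
    rw [pickLoop_spec qual.length qual le_rfl none]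
    rw [show combineBest none (mspec qual) = mspec qual from rfl]
    unfold mspec
    rw [show PySem.List.dedup qual = PySem.Set.ofList qual from rfl]
    have hkey : ∀ k ∈ PySem.Set.ofList qual,
        (PySem.Dict.counter qual).getD k 0 = ((qual.count k : Int)) :=
      fun k _ => PySem.Dict.getD_counter qual k
    rw [max?_congr _ _ _ hkey]
    cases h : PySem.List.max? (PySem.Set.ofList qual) (fun k => (qual.count k : Int)) with
    | none =>
      have he : PySem.Set.ofList qual = [] := (PySem.List.max?_eq_none_iff _ _).mp h
      simp [he]
    | some m =>
      have hne : ¬ PySem.Set.ofList qual = [] := by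
        intro hc; rw [hc] at h
        exact absurd h (by simp [PySem.List.max?])
      rw [if_neg hne]

-- ===== VERDICT (by name: the statement is the Claim_ definition above) =====
theorem get_dominant_py_spec : Claim_equal_get_dominant_py := by
  intro history _
  unfold Spec_get_dominant_py
  exact get_dominant_core history
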